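-- pv_equiv track=rewrite | github.com/eliasburk04-dot/Threads-Pipeline | threads_github_bot/generation.py | _build_thread_generation_attempts
-- ===== SOURCE A (Python) =====
-- from typing import Dict, List, Optional, Tuple
--
-- THREAD_GENERATION_MAX_ATTEMPTS = 3
--
-- THREAD_GENERATION_RETRY_TOKEN_FLOOR = 800
--
-- def _build_thread_generation_attempts(base_max_output_tokens: int) -> Tuple[int, ...]:
--     normalized_base = max(180, int(base_max_output_tokens))
--     attempts = [normalized_base]
--     retry_budget = max(normalized_base * 2, THREAD_GENERATION_RETRY_TOKEN_FLOOR)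
--     while len(attempts) < THREAD_GENERATION_MAX_ATTEMPTS:
--         if retry_budget <= attempts[-1]:
--             retry_budget = attempts[-1] + 200
--         attempts.append(retry_budget)
--         retry_budget += 200
--     return tuple(attempts)
-- ===== SOURCE B (Python) =====
-- THREAD_GENERATION_RETRY_TOKEN_FLOOR = 800
--
-- def _build_thread_generation_attempts(base_max_output_tokens):
--     # The loop in A is fully deterministic: closed-form three attempts.
--     base = max(180, int(base_max_output_tokens))
--     second = max(base * 2, THREAD_GENERATION_RETRY_TOKEN_FLOOR)
--     return (base, second, second + 200)
-- ===== Notes on version B (the rewrite author's own statement) =====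
-- stated objective: simpler
-- what changed: Replaced the while-loop with in-loop guards (which are provably dead since the retry budget always exceeds the last attempt) by a closed-form three-element tuple.
import Mathlib
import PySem

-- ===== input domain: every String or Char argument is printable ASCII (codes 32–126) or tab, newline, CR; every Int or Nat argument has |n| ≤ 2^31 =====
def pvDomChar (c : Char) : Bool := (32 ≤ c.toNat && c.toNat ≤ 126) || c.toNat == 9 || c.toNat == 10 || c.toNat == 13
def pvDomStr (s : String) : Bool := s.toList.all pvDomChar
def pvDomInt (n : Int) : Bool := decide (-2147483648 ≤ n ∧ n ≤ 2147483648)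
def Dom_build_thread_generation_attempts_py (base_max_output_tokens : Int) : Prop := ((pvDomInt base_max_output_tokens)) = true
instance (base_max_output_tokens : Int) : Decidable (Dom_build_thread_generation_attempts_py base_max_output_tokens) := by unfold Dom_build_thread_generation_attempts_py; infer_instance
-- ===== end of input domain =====

-- B replaces A's deterministic while-loop by a closed-form three-attempt tuple (simpler).


-- ===== PORT A =====
-- loop of A: while len(attempts) < 3, with the in-loop budget guard; fuel 3 bounds it
def pvLoopA : Nat → List Int → Int → List Int
  | 0, attempts, _ => attempts
  | n+1, attempts, retry_budget =>
    if attempts.length < 3 then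
      -- attempts[-1] (attempts is never empty here, so default 0 is unreachable)
      let last := (PySem.List.pyGet? attempts (-1)).getD 0
      let rb := if retry_budget ≤ last then last + 200 else retry_budget
      pvLoopA n (attempts ++ [rb]) (rb + 200)
    else attempts

def build_thread_generation_attempts_py (base_max_output_tokens : Int) : List Int :=
  let normalized_base := max 180 base_max_output_tokens
  let attempts := [normalized_base]
  let retry_budget := max (normalized_base * 2) 800
  pvLoopA 3 attempts retry_budget

-- ===== PORT B =====
def build_thread_generation_attempts_py_alt (base_max_output_tokens : Int) : List Int :=
  let base := max 180 base_max_output_tokens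
  let second := max (base * 2) 800
  [base, second, second + 200]

-- ===== PRECONDITION & SPEC =====
def Spec_build_thread_generation_attempts_py (base_max_output_tokens : Int) (out : List Int) : Prop := out = build_thread_generation_attempts_py_alt base_max_output_tokens
instance (base_max_output_tokens : Int) (out : List Int) : Decidable (Spec_build_thread_generation_attempts_py base_max_output_tokens out) := by unfold Spec_build_thread_generation_attempts_py; infer_instance

-- ===== CLAIM (what is proved, stated in full; the proofs are below) =====
def Claim_equal_build_thread_generation_attempts_py : Prop := ∀ (base_max_output_tokens : Int), Dom_build_thread_generation_attempts_py base_max_output_tokens → Spec_build_thread_generation_attempts_py base_max_output_tokens (build_thread_generation_attempts_py base_max_output_tokens)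

-- ===== LEMMAS AND PROOFS =====

-- ===== VERDICT (by name: the statement is the Claim_ definition above) =====
theorem build_thread_generation_attempts_py_spec : Claim_equal_build_thread_generation_attempts_py := by
  intro b _
  unfold Spec_build_thread_generation_attempts_py
  unfold build_thread_generation_attempts_py build_thread_generation_attempts_py_alt
  simp only [pvLoopA, PySem.List.pyGet?, PySem.List.pyIdx?]
  norm_num
  omega
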